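-- pv_equiv track=rewrite | github.com/augy-studios/vera-judgement-games | utils/games.py | validate_haiku
-- ===== SOURCE A (Python) =====
-- def count_syllables(word: str) -> int:
--     word = word.lower().strip(".,!?;:'\"")
--     if not word:
--         return 0
--     vowels = "aeiouy"
--     count = 0
--     prev_vowel = False
--     for ch in word:
--         is_vowel = ch in vowels
--         if is_vowel and not prev_vowel:
--             count += 1
--         prev_vowel = is_vowel
--     if word.endswith("e") and count > 1:
--         count -= 1
--     return max(1, count)
--
-- def validate_haiku(text: str):
--     lines = [l.strip() for l in text.strip().splitlines() if l.strip()]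
--     if len(lines) != 3:
--         return False, "A haiku must have exactly 3 lines."
--     expected = [5, 7, 5]
--     for i, (line, exp) in enumerate(zip(lines, expected)):
--         words = line.split()
--         total = sum(count_syllables(w) for w in words)
--         if total != exp:
--             return False, (
--                 f"Line {i+1} has ~{total} syllable(s), but needs {exp}. "
--                 f"*('{line}')*"
--             )
--     return True, None
-- ===== SOURCE B (Python) =====
-- def _syllables(word: str) -> int:
--     word = word.lower().strip(".,!?;:'\"")
--     if not word:
--         return 0
--     # maximal vowel runs: turn non-vowels into spaces, split on whitespace
--     count = len("".join(c if c in "aeiouy" else " " for c in word).split())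
--     if word.endswith("e") and count > 1:
--         count -= 1
--     return max(1, count)
--
-- def validate_haiku(text: str):
--     lines = [l.strip() for l in text.strip().splitlines() if l.strip()]
--     if len(lines) != 3:
--         return False, "A haiku must have exactly 3 lines."
--     expected = [5, 7, 5]
--     totals = [sum(_syllables(w) for w in line.split()) for line in lines]
--     bad = next((i for i in range(3) if totals[i] != expected[i]), None)
--     if bad is None:
--         return True, None
--     return False, (
--         f"Line {bad+1} has ~{totals[bad]} syllable(s), but needs {expected[bad]}. "
--         f"*('{lines[bad]}')*"
--     )
-- ===== Notes on version B (the rewrite author's own statement) =====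
-- stated objective: alternative
-- what changed: Syllable counting replaces the per-character prev_vowel state machine by mapping non-vowels to spaces and counting the whitespace-split groups, and the line check computes all three totals up front and locates the first mismatch instead of early-returning inside the loop.
import Mathlib
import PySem

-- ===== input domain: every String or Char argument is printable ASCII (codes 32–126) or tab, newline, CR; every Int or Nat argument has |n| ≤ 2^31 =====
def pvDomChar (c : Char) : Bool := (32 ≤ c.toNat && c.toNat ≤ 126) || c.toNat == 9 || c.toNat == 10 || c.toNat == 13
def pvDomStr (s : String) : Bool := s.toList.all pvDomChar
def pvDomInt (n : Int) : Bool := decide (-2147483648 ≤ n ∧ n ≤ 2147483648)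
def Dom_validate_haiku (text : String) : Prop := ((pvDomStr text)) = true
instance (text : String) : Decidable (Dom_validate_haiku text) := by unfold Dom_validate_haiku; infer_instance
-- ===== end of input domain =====

-- B replaces A's per-character prev_vowel state machine by "blank out the non-vowels and count the
-- whitespace-split groups", and replaces A's early-return line loop by computing all line totals and
-- locating the first mismatch; same return value everywhere (objective: alternative).

def pvVowels : List Char := ['a', 'e', 'i', 'o', 'u', 'y']

def pvStripSet : List Char := ['.', ',', '!', '?', ';', ':', '\'', '\"']

-- ===== PORT A =====
-- count_syllables: lower/strip, then a fold carrying (count, prev_vowel)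
def count_syllables (w : List Char) : Int :=
  let word := PySem.Chars.stripChars (PySem.Chars.lower w) pvStripSet
  if word.isEmpty then 0
  else
    let st := word.foldl (fun (s : Int × Bool) ch =>
      let isV := pvVowels.contains ch
      (if isV && !s.2 then s.1 + 1 else s.1, isV)) (0, false)
    let count := st.1
    let count := if PySem.Chars.endswith word ['e'] && decide (count > 1) then count - 1 else count
    max 1 count

def pvMsgA (i : Int) (total exp : Int) (line : List Char) : String :=
  "Line " ++ PySem.Int.toStr (i + 1) ++ " has ~" ++ PySem.Int.toStr total ++
    " syllable(s), but needs " ++ PySem.Int.toStr exp ++ ". *('" ++ String.ofList line ++ "')*"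

-- the for-loop over enumerate(zip(lines, expected)) with its early returns
def pvLoopA : List (Int × (List Char × Int)) → Bool × Option String
  | [] => (true, none)
  | (i, (line, exp)) :: rest =>
    let total := ((PySem.Chars.split₀ line).map count_syllables).sum
    if total ≠ exp then (false, some (pvMsgA i total exp line)) else pvLoopA rest

def validate_haiku (text : String) : Bool × Option String :=
  let lines := ((PySem.Chars.splitlines (PySem.Chars.strip text.toList)).map
    PySem.Chars.strip).filter (fun l => !l.isEmpty)
  if lines.length ≠ 3 then (false, some "A haiku must have exactly 3 lines.")
  else
    let expected : List Int := [5, 7, 5]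
    pvLoopA (PySem.List.enumerate (lines.zip expected))

-- ===== PORT B =====
def pvBlank (c : Char) : Char := if pvVowels.contains c then c else ' '

-- _syllables: "".join(c if c in vowels else " " for c in word) is word.map pvBlank; .split() is split₀
def count_syllables_alt (w : List Char) : Int :=
  let word := PySem.Chars.stripChars (PySem.Chars.lower w) pvStripSet
  if word.isEmpty then 0
  else
    let count : Int := (PySem.Chars.split₀ (word.map pvBlank)).length
    let count := if PySem.Chars.endswith word ['e'] && decide (count > 1) then count - 1 else count
    max 1 count

def pvMsgB (i : Int) (t e : Int) (line : List Char) : String :=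
  "Line " ++ PySem.Int.toStr (i + 1) ++ " has ~" ++ PySem.Int.toStr t ++
    " syllable(s), but needs " ++ PySem.Int.toStr e ++ ". *('" ++ String.ofList line ++ "')*"

def validate_haiku_alt (text : String) : Bool × Option String :=
  let lines := ((PySem.Chars.splitlines (PySem.Chars.strip text.toList)).map
    PySem.Chars.strip).filter (fun l => !l.isEmpty)
  if lines.length ≠ 3 then (false, some "A haiku must have exactly 3 lines.")
  else
    let expected : List Int := [5, 7, 5]
    let totals := lines.map (fun line => ((PySem.Chars.split₀ line).map count_syllables_alt).sum)
    -- next((… for i, (line, t, e) in enumerate(zip(lines, totals, expected)) if t != e), None)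
    match (PySem.List.enumerate (lines.zip (totals.zip expected))).find?
        (fun x => x.2.2.1 != x.2.2.2) with
    | none => (true, none)
    | some (i, (line, (t, e))) => (false, some (pvMsgB i t e line))

-- ===== PRECONDITION & SPEC =====
def Spec_validate_haiku (text : String) (out : Bool × Option String) : Prop := out = validate_haiku_alt text
instance (text : String) (out : Bool × Option String) : Decidable (Spec_validate_haiku text out) := by unfold Spec_validate_haiku; infer_instance

-- ===== CLAIM (what is proved, stated in full; the proofs are below) =====
def Claim_equal_validate_haiku : Prop := ∀ (text : String), Dom_validate_haiku text → Spec_validate_haiku text (validate_haiku text)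

-- ===== LEMMAS AND PROOFS =====

-- rising-edge count: number of positions holding a vowel whose predecessor is not a vowel
-- (b = "an edge is open", i.e. the previous character was not a vowel)
def pvE (l : List Char) (b : Bool) : Int :=
  match l with
  | [] => 0
  | c :: r =>
    let v := pvVowels.contains c
    (if v && b then 1 else 0) + pvE r (!v)

theorem pvFoldA_eq_pvE (l : List Char) (n : Int) (prev : Bool) :
    (l.foldl (fun (s : Int × Bool) ch =>
      let isV := pvVowels.contains ch
      (if isV && !s.2 then s.1 + 1 else s.1, isV)) (n, prev)).1 = n + pvE l (!prev) := by
  induction l generalizing n prev with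
  | nil => simp [pvE]
  | cons c r ih =>
    simp only [List.foldl_cons, pvE, ih]
    by_cases hm : c ∈ pvVowels <;> cases prev <;>
      simp [List.contains_eq_mem, hm] <;> omega

-- count of whitespace-separated groups in s, given b = "previous character was a break/start"
def pvS (l : List Char) (b : Bool) : Int :=
  match l with
  | [] => 0
  | c :: r => if PySem.Chars.isspace c then pvS r true else (if b then 1 else 0) + pvS r false

theorem pvGo_len (s : List Char) (cur : List Char) (acc : List (List Char)) :
    ((PySem.Chars.split₀.go s cur acc).length : Int)
      = acc.length + (if cur.isEmpty then 0 else 1) + pvS s cur.isEmpty := by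
  induction s generalizing cur acc with
  | nil => cases cur <;> simp [PySem.Chars.split₀.go, pvS]
  | cons c r ih =>
    by_cases h : PySem.Chars.isspace c = true <;>
      cases cur <;> simp [PySem.Chars.split₀.go, h, pvS, ih] <;> ring

theorem pvSplit_len (s : List Char) :
    ((PySem.Chars.split₀ s).length : Int) = pvS s true := by
  simpa using pvGo_len s [] []

theorem pvBlank_isspace (c : Char) :
    PySem.Chars.isspace (pvBlank c) = !pvVowels.contains c := by
  by_cases h : pvVowels.contains c = true
  · rw [pvBlank, if_pos h, h, Bool.not_true]
    simp [pvVowels] at h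
    rcases h with rfl | rfl | rfl | rfl | rfl | rfl <;> decide
  · have h' : pvVowels.contains c = false := by rwa [Bool.not_eq_true] at h
    rw [pvBlank, if_neg h, h']
    decide

theorem pvS_map_blank (l : List Char) (b : Bool) :
    pvS (l.map pvBlank) b = pvE l b := by
  induction l generalizing b with
  | nil => simp [pvS, pvE]
  | cons c r ih =>
    simp only [List.map_cons, pvS, pvE, pvBlank_isspace, ih]
    by_cases hm : c ∈ pvVowels <;> cases b <;> simp [List.contains_eq_mem, hm]

theorem count_syllables_eq (w : List Char) : count_syllables w = count_syllables_alt w := by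
  unfold count_syllables count_syllables_alt
  simp only [pvFoldA_eq_pvE, pvSplit_len, pvS_map_blank, Bool.not_false, zero_add]

theorem counts_fun_eq : count_syllables = count_syllables_alt := funext count_syllables_eq

-- ===== VERDICT (by name: the statement is the Claim_ definition above) =====
theorem validate_haiku_spec : Claim_equal_validate_haiku := by
  intro text _
  unfold Spec_validate_haiku validate_haiku validate_haiku_alt
  set lines := ((PySem.Chars.splitlines (PySem.Chars.strip text.toList)).map
    PySem.Chars.strip).filter (fun l => !l.isEmpty) with hl
  by_cases h3 : lines.length = 3
  · obtain ⟨a, b, c, habc⟩ := List.length_eq_three.mp h3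
    simp only [habc]
    simp only [List.zip, List.zipWith, PySem.List.enumerate, List.map, List.find?,
      pvLoopA, counts_fun_eq, pvMsgA, pvMsgB]
    norm_num
    clear hl habc h3 lines
    split_ifs <;> first
      | rfl
      | (simp_all [bne, beq_eq_decide]; try norm_num)
  · simp [h3]
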